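-- pv_equiv track=rewrite | github.com/cute-cirno/LeetCode | Easy/HW-Q23.py | manage_directory
-- ===== SOURCE A (Python) =====
-- class FileSystem:
--     def __init__(self):
--         self.root = {}
--         self.current_path = ['/']
--         self.current_dir = self.root
--
--     def mkdir(self, dirname):
--         if dirname in self.current_dir:
--             return  # 目录已存在，不执行任何操作
--         self.current_dir[dirname] = {}
--
--     def cd(self, dirname):
--         if dirname == '..':
--             if len(self.current_path) > 1:
--                 self.current_path.pop()
--                 self.current_dir = self.root
--                 for dir in self.current_path[1:]:
--                     self.current_dir = self.current_dir[dir]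
--         elif dirname in self.current_dir:
--             self.current_path.append(dirname)
--             self.current_dir = self.current_dir[dirname]
--         else:
--             return  # 目录不存在，不执行任何操作
--
--     def pwd(self):
--         return '/' + '/'.join(self.current_path[1:])
--
--     def execute_command(self, command):
--         parts = command.split()
--         if len(parts) == 0:
--             return
--
--         cmd = parts[0]
--         if cmd == 'mkdir' and len(parts) == 2:
--             self.mkdir(parts[1])
--         elif cmd == 'cd' and len(parts) == 2:
--             self.cd(parts[1])
--         elif cmd == 'pwd' and len(parts) == 1:
--             return self.pwd()
--         else:
--             return  # 无效命令，不执行任何操作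
--
-- def manage_directory(commands):
--     fs = FileSystem()
--     last_output = None
--     for command in commands:
--         result = fs.execute_command(command)
--         if result is not None:
--             last_output = result
--     return last_output
-- ===== SOURCE B (Python) =====
-- def manage_directory(commands):
--     # Flat representation: the set of existing directory paths (as tuples)
--     # plus the current path, instead of a nested dict tree.
--     dirs = set()
--     path = []
--     last_output = None
--     for command in commands:
--         parts = command.split()
--         if not parts:
--             continue
--         cmd = parts[0]
--         if cmd == 'mkdir' and len(parts) == 2:
--             dirs.add(tuple(path) + (parts[1],))
--         elif cmd == 'cd' and len(parts) == 2:
--             if parts[1] == '..':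
--                 if path:
--                     path.pop()
--             elif tuple(path) + (parts[1],) in dirs:
--                 path.append(parts[1])
--         elif cmd == 'pwd' and len(parts) == 1:
--             last_output = '/' + '/'.join(path)
--     return last_output
-- ===== Notes on version B (the rewrite author's own statement) =====
-- stated objective: alternative
-- what changed: B replaces A's nested-dict tree (whose 'cd ..' rebuilds the current directory by re-walking the whole path from the root) with a flat set of existing directory paths plus the current path, so 'cd ..' is a single pop and no tree is kept at all.
import Mathlib
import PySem

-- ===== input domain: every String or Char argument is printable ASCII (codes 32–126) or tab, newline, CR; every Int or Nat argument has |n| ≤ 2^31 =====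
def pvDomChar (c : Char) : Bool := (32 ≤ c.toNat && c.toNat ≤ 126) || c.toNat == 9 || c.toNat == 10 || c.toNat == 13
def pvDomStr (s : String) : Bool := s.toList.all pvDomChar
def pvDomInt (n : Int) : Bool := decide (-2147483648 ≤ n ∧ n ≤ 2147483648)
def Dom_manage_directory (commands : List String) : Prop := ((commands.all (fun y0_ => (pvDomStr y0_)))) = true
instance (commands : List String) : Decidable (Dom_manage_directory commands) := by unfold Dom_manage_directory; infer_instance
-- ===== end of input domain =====

-- B simulates the shell with a flat set of existing directory paths instead of A's
-- nested-dict tree; same return value, a genuinely different data structure (alternative).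

-- ===== PORT A =====
-- A's nested dicts of subdirectories: an entry list (key, children, rest).
inductive Ent where
  | nil : Ent
  | cons : String → Ent → Ent → Ent
deriving DecidableEq, Repr

-- 'dirname in d'
def memE (n : String) : Ent → Bool
  | .nil => false
  | .cons m _ r => m == n || memE n r

-- 'd[dirname]' (guarded in A, so the .nil default is never observed)
def getE (n : String) : Ent → Ent
  | .nil => .nil
  | .cons m c r => if m == n then c else getE n r

-- A's mkdir body: 'if dirname in d: return; d[dirname] = {}' — append if absent
def insE (n : String) : Ent → Ent
  | .nil => .cons n .nil .nil
  | .cons m c r => if m == n then .cons m c r else .cons m c (insE n r)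

-- replace the children of key n (used to make the alias write below explicit)
def setE (n : String) (v : Ent) : Ent → Ent
  | .nil => .nil
  | .cons m c r => if m == n then .cons m v r else .cons m c (setE n v r)

-- A's 'for dir in current_path[1:]: current_dir = current_dir[dir]'
def walk (e : Ent) (p : List String) : Ent :=
  p.foldl (fun d dir => getE dir d) e

-- In Python, current_dir aliases the node of root at current_path, so A's
-- 'current_dir[dirname] = {}' is also a write into root: mkAt is that write.
def mkAt (e : Ent) (p : List String) (n : String) : Ent :=
  match p with
  | [] => insE n e
  | a :: p' => setE a (mkAt (getE a e) p' n) e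

-- A's execute_command on state (root, current_path without its constant '/' head,
-- current_dir); returns new state and the optional pwd output.
def execA (root : Ent) (path : List String) (curr : Ent) (command : String) :
    Ent × List String × Ent × Option String :=
  let parts := PySem.Str.split₀ command
  if parts.length = 0 then (root, path, curr, none)
  else
    let cmd := parts.getD 0 ""   -- parts[0], in range
    if cmd = "mkdir" ∧ parts.length = 2 then
      let n := parts.getD 1 ""   -- parts[1], in range
      (mkAt root path n, path, insE n curr, none)
    else if cmd = "cd" ∧ parts.length = 2 then
      let n := parts.getD 1 ""
      if n = ".." then
        if path.length > 0 then   -- len(current_path) > 1 ('/' head not stored)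
          let path' := path.dropLast
          (root, path', walk root path', none)   -- rebuild current_dir from root
        else (root, path, curr, none)
      else if memE n curr then (root, path ++ [n], getE n curr, none)
      else (root, path, curr, none)
    else if cmd = "pwd" ∧ parts.length = 1 then
      (root, path, curr, some ("/" ++ PySem.Str.join "/" path))
    else (root, path, curr, none)

def loopA : List String → Ent → List String → Ent → Option String → Option String
  | [], _, _, _, last => last
  | c :: cs, root, path, curr, last =>
    let r := execA root path curr c
    loopA cs r.1 r.2.1 r.2.2.1 (match r.2.2.2 with | some s => some s | none => last)

def manage_directory (commands : List String) : Option String :=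
  loopA commands Ent.nil [] Ent.nil none

-- ===== PORT B =====
-- B: 'dirs' is the set of existing directory paths, 'path' the current path.
def execB (dirs : PySem.Set (List String)) (path : List String) (command : String) :
    PySem.Set (List String) × List String × Option String :=
  let parts := PySem.Str.split₀ command
  if parts.length = 0 then (dirs, path, none)
  else
    let cmd := parts.getD 0 ""
    if cmd = "mkdir" ∧ parts.length = 2 then
      (PySem.Set.add dirs (path ++ [parts.getD 1 ""]), path, none)
    else if cmd = "cd" ∧ parts.length = 2 then
      let n := parts.getD 1 ""
      if n = ".." then
        if path.length > 0 then (dirs, path.dropLast, none)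
        else (dirs, path, none)
      else if PySem.Set.contains dirs (path ++ [n]) then (dirs, path ++ [n], none)
      else (dirs, path, none)
    else if cmd = "pwd" ∧ parts.length = 1 then
      (dirs, path, some ("/" ++ PySem.Str.join "/" path))
    else (dirs, path, none)

def loopB : List String → PySem.Set (List String) → List String → Option String → Option String
  | [], _, _, last => last
  | c :: cs, dirs, path, last =>
    let r := execB dirs path c
    loopB cs r.1 r.2.1 (match r.2.2 with | some s => some s | none => last)

def manage_directory_alt (commands : List String) : Option String :=
  loopB commands PySem.Set.empty [] none

-- ===== PRECONDITION & SPEC =====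
def Spec_manage_directory (commands : List String) (out : Option String) : Prop := out = manage_directory_alt commands
instance (commands : List String) (out : Option String) : Decidable (Spec_manage_directory commands out) := by unfold Spec_manage_directory; infer_instance

-- ===== CLAIM (what is proved, stated in full; the proofs are below) =====
def Claim_equal_manage_directory : Prop := ∀ (commands : List String), Dom_manage_directory commands → Spec_manage_directory commands (manage_directory commands)

-- ===== LEMMAS AND PROOFS =====

-- 'p is an existing directory path in the tree e'
def isDir : Ent → List String → Bool
  | _, [] => true
  | e, n :: p => memE n e && isDir (getE n e) p

theorem isDir_nil_iff (p : List String) : isDir Ent.nil p = true ↔ p = [] := by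
  cases p <;> simp [isDir, memE]

theorem insE_of_mem (n : String) (e : Ent) (h : memE n e = true) : insE n e = e := by
  induction e with
  | nil => simp [memE] at h
  | cons m c r ihc ihr =>
    simp only [insE]
    by_cases hm : m = n
    · rw [if_pos (by simpa using hm)]
    · rw [if_neg (by simpa using hm)]
      simp [memE, hm] at h
      rw [ihr h]

theorem memE_insE (m n : String) (e : Ent) :
    memE m (insE n e) = true ↔ (memE m e = true ∨ m = n) := by
  induction e with
  | nil =>
    simp only [insE]
    simp [memE]
    exact ⟨Eq.symm, Eq.symm⟩
  | cons k c r ihc ihr =>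
    simp only [insE]
    by_cases hk : k = n
    · rw [if_pos (by simpa using hk)]
      subst hk
      constructor
      · exact Or.inl
      · rintro (h | rfl)
        · exact h
        · simp [memE]
    · rw [if_neg (by simpa using hk)]
      simp [memE, ihr]
      tauto

theorem getE_insE (m n : String) (e : Ent) (h : memE n e = false) :
    getE m (insE n e) = if m = n then Ent.nil else getE m e := by
  induction e with
  | nil =>
    simp only [insE]
    simp only [getE]
    by_cases hmn : m = n
    · simp [hmn]
    · have : (n == m) = false := by simpa using fun hh => hmn hh.symm
      simp [this, hmn]
  | cons k c r ihc ihr =>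
    simp [memE] at h
    obtain ⟨hk, hr⟩ := h
    have hk' : k ≠ n := by simpa using hk
    simp only [insE]
    rw [if_neg (by simpa using hk')]
    simp only [getE]
    rw [ihr hr]
    by_cases hmk : k = m
    · subst hmk
      simp [hk']
    · have hkm : (k == m) = false := by simpa using hmk
      simp [hkm]

theorem memE_setE (m n : String) (v : Ent) (e : Ent) :
    memE m (setE n v e) = memE m e := by
  induction e with
  | nil => rfl
  | cons k c r ihc ihr =>
    simp only [setE]
    by_cases hk : k = n
    · rw [if_pos (by simpa using hk)]; simp [memE]
    · rw [if_neg (by simpa using hk)]; simp [memE, ihr]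

theorem getE_setE (m n : String) (v : Ent) (e : Ent) (h : memE n e = true) :
    getE m (setE n v e) = if m = n then v else getE m e := by
  induction e with
  | nil => simp [memE] at h
  | cons k c r ihc ihr =>
    simp only [setE]
    by_cases hk : k = n
    · rw [if_pos (by simpa using hk)]
      subst hk
      simp only [getE]
      by_cases hm : k = m
      · subst hm; simp
      · have h1 : (k == m) = false := by simpa using hm
        have h2 : ¬ m = k := fun hh => hm hh.symm
        simp [h1, h2]
    · rw [if_neg (by simpa using hk)]
      simp [memE, hk] at h
      simp only [getE]
      rw [ihr h]
      by_cases hm : k = m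
      · subst hm
        have h2 : ¬ k = n := hk
        simp [h2]
      · have h1 : (k == m) = false := by simpa using hm
        simp [h1]

theorem walk_cons (e : Ent) (n : String) (p : List String) :
    walk e (n :: p) = walk (getE n e) p := rfl

theorem walk_append (e : Ent) (p : List String) (n : String) :
    walk e (p ++ [n]) = getE n (walk e p) := by
  simp [walk, List.foldl_append]

theorem isDir_append (e : Ent) (p : List String) (n : String) :
    isDir e (p ++ [n]) = true ↔ (isDir e p = true ∧ memE n (walk e p) = true) := by
  induction p generalizing e with
  | nil => simp [isDir, walk]
  | cons a p ih =>
    simp only [List.cons_append, isDir, Bool.and_eq_true, walk_cons, ih]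
    tauto

theorem isDir_insE (e : Ent) (n : String) (q : List String) :
    isDir (insE n e) q = true ↔ (isDir e q = true ∨ q = [n]) := by
  cases q with
  | nil => simp [isDir]
  | cons m p =>
    by_cases hm : memE n e = true
    · rw [insE_of_mem n e hm]
      constructor
      · exact Or.inl
      · rintro (h | h)
        · exact h
        · obtain ⟨rfl, rfl⟩ : m = n ∧ p = [] := by simpa using h
          simp [isDir, hm]
    · have hm' : memE n e = false := by simpa using hm
      by_cases hmn : m = n
      · subst hmn
        simp [isDir, memE_insE, getE_insE _ _ _ hm', isDir_nil_iff, hm']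
      · simp [isDir, memE_insE, hmn, getE_insE _ _ _ hm']

theorem isDir_mkAt (e : Ent) (p : List String) (n : String) (h : isDir e p = true) :
    ∀ q, isDir (mkAt e p n) q = true ↔ (isDir e q = true ∨ q = p ++ [n]) := by
  induction p generalizing e with
  | nil => intro q; simpa [mkAt] using isDir_insE e n q
  | cons a p ih =>
    intro q
    simp only [isDir, Bool.and_eq_true] at h
    obtain ⟨ha, hp⟩ := h
    cases q with
    | nil => simp [isDir]
    | cons m p' =>
      by_cases hma : m = a
      · subst hma
        have hg : getE m (setE m (mkAt (getE m e) p n) e) = mkAt (getE m e) p n := by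
          rw [getE_setE _ _ _ _ ha, if_pos rfl]
        simp only [mkAt, isDir, Bool.and_eq_true, memE_setE, hg,
          ih _ hp, ha, true_and, List.cons_append, List.cons.injEq]
      · simp only [mkAt, isDir, Bool.and_eq_true, memE_setE,
          getE_setE _ _ _ _ ha, if_neg hma, List.cons_append, List.cons.injEq]
        simp [hma]

theorem walk_mkAt (e : Ent) (p : List String) (n : String) (h : isDir e p = true) :
    walk (mkAt e p n) p = insE n (walk e p) := by
  induction p generalizing e with
  | nil => rfl
  | cons a p ih =>
    simp only [isDir, Bool.and_eq_true] at h
    obtain ⟨ha, hp⟩ := h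
    rw [mkAt, walk_cons, getE_setE _ _ _ _ ha]
    simp [walk_cons, ih _ hp]

theorem isDir_dropLast (e : Ent) (p : List String) (h : isDir e p = true) :
    isDir e p.dropLast = true := by
  induction p generalizing e with
  | nil => simp [isDir]
  | cons a p ih =>
    cases p with
    | nil => simp [isDir]
    | cons b p' =>
      have hd : (a :: b :: p').dropLast = a :: (b :: p').dropLast := rfl
      rw [hd]
      simp only [isDir, Bool.and_eq_true] at h ⊢
      exact ⟨h.1, ih _ (by simp only [isDir, Bool.and_eq_true]; exact h.2)⟩

-- the simulation invariant between A's state and B's state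
def SimInv (root : Ent) (path : List String) (curr : Ent)
    (dirs : PySem.Set (List String)) (bpath : List String) : Prop :=
  bpath = path ∧ curr = walk root path ∧ isDir root path = true ∧
  ∀ q : List String, q ∈ dirs ↔ (q ≠ [] ∧ isDir root q = true)

theorem exec_step (root : Ent) (path : List String) (curr : Ent)
    (dirs : PySem.Set (List String)) (bpath : List String) (c : String)
    (h : SimInv root path curr dirs bpath) :
    SimInv (execA root path curr c).1 (execA root path curr c).2.1 (execA root path curr c).2.2.1
        (execB dirs bpath c).1 (execB dirs bpath c).2.1
      ∧ (execA root path curr c).2.2.2 = (execB dirs bpath c).2.2 := by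
  obtain ⟨rfl, rfl, hvalid, hdirs⟩ := h
  have hmemiff : ∀ n : String,
      (memE n (walk root bpath) = true ↔ PySem.Set.contains dirs (bpath ++ [n]) = true) := by
    intro n
    rw [PySem.Set.contains_iff, hdirs, isDir_append]
    simp [hvalid]
  simp only [execB, execA]
  split_ifs with h1 h2 h3 h4 h5 h6 h7 h8 h9
  all_goals dsimp only
  all_goals refine ⟨⟨?_, ?_, ?_, ?_⟩, ?_⟩ <;> try rfl
  all_goals first
    | rfl
    | exact hvalid
    | exact hdirs
    | exact isDir_dropLast _ _ hvalid
    | exact (walk_mkAt _ _ _ hvalid).symm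
    | exact (isDir_mkAt root bpath _ hvalid bpath).mpr (Or.inl hvalid)
    | exact (walk_append root bpath _).symm
    | exact (isDir_append root bpath _).mpr ⟨hvalid, by assumption⟩
    | exact absurd ((hmemiff _).mp (by assumption)) (by assumption)
    | exact absurd ((hmemiff _).mpr (by assumption)) (by assumption)
    | (intro q
       rw [PySem.Set.mem_add, hdirs, isDir_mkAt root bpath _ hvalid q]
       constructor
       · rintro (⟨hq, hd⟩ | rfl)
         · exact ⟨hq, Or.inl hd⟩
         · exact ⟨by simp, Or.inr rfl⟩
       · rintro ⟨hq, hd | rfl⟩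
         · exact Or.inl ⟨hq, hd⟩
         · exact Or.inr rfl)

theorem loop_eq (cs : List String) : ∀ (root : Ent) (path : List String) (curr : Ent)
    (dirs : PySem.Set (List String)) (bpath : List String) (last : Option String),
    SimInv root path curr dirs bpath →
    loopA cs root path curr last = loopB cs dirs bpath last := by
  induction cs with
  | nil => intro _ _ _ _ _ _ _; rfl
  | cons c cs ih =>
    intro root path curr dirs bpath last h
    obtain ⟨hinv, hres⟩ := exec_step root path curr dirs bpath c h
    simp only [loopA, loopB, hres]
    exact ih _ _ _ _ _ _ hinv

-- ===== VERDICT (by name: the statement is the Claim_ definition above) =====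
theorem manage_directory_spec : Claim_equal_manage_directory := by
  intro commands _
  unfold Spec_manage_directory manage_directory manage_directory_alt
  refine loop_eq commands _ _ _ _ _ _ ⟨rfl, rfl, rfl, ?_⟩
  intro q
  simp [PySem.Set.empty, isDir_nil_iff]
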